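-- pv_equiv track=rewrite | github.com/soCzech/photoSync | photoSync/Explorer.py | compare_photosets
-- ===== SOURCE A (Python) =====
-- def compare_photosets(ps1, ps2):
-- 	(missing_in_ps1, missing_in_ps2) = ({}, {})
--
-- 	for photo in ps2:
-- 		if not photo in ps1:
-- 			missing_in_ps1[photo] = ps2[photo]
-- 	for photo in ps1:
-- 		if not photo in ps2:
-- 			missing_in_ps2[photo] = ps1[photo]
--
-- 	return (missing_in_ps1, missing_in_ps2)
-- ===== SOURCE B (Python) =====
-- def compare_photosets(ps1, ps2):
-- 	# copy-then-delete: start from full copies of each photoset and remove the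
-- 	# keys the other photoset also has, instead of filtering and inserting
-- 	missing_in_ps1 = dict(ps2)
-- 	missing_in_ps2 = dict(ps1)
-- 	for photo in ps1:
-- 		missing_in_ps1.pop(photo, None)
-- 	for photo in ps2:
-- 		missing_in_ps2.pop(photo, None)
-- 	return (missing_in_ps1, missing_in_ps2)
-- ===== Notes on version B (the rewrite author's own statement) =====
-- stated objective: alternative
-- what changed: A builds each missing-dict by filtering the other photoset with membership tests and inserting the survivors; B instead copies each photoset whole and then deletes (pop) the keys present in the other one, so no membership test occurs at all. Pre_ excludes association lists with duplicate keys, which do not encode any Python dict (both parameters are dicts, so no Python-level input is excluded).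
import Mathlib
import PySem

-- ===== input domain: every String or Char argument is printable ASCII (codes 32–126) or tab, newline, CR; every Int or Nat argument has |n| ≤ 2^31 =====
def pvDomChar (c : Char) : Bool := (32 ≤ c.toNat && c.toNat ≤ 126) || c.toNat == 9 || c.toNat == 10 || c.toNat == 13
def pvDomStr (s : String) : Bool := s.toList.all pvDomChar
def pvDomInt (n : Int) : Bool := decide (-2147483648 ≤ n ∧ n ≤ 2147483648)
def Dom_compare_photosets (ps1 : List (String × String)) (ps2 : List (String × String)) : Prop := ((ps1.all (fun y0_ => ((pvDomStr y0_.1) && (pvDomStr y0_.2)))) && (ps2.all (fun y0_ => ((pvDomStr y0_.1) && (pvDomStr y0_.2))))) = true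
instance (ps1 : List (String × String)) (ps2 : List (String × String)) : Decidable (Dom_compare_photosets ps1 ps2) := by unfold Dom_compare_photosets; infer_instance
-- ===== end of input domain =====

-- B builds each result by copying the photoset whole and deleting the other's keys (pop), instead of A's filter-and-insert passes; alternative decomposition, same cost.


-- ===== PORT A =====
-- A: two filter loops; the first inserts every ps2 entry whose key is missing from ps1,
-- the second inserts every ps1 entry whose key is missing from ps2.
-- ps2[photo] never raises (photo iterates ps2's keys), so getD's default is unreachable.
def compare_photosets (ps1 : List (String × String)) (ps2 : List (String × String)) : (List (String × String)) × (List (String × String)) :=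
  let d1 : PySem.Dict String String := PySem.Dict.mk ps1
  let d2 : PySem.Dict String String := PySem.Dict.mk ps2
  let missing_in_ps1 := ps2.foldl
    (fun (m : PySem.Dict String String) photo =>
      if !(d1.contains photo.1) then m.insert photo.1 (d2.getD photo.1 "") else m)
    PySem.Dict.empty
  let missing_in_ps2 := ps1.foldl
    (fun (m : PySem.Dict String String) photo =>
      if !(d2.contains photo.1) then m.insert photo.1 (d1.getD photo.1 "") else m)
    PySem.Dict.empty
  (missing_in_ps1.items, missing_in_ps2.items)

-- ===== PORT B =====
-- B: copy each photoset whole (dict(ps2) / dict(ps1)), then delete the other's keys.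
-- dict.pop(k, None) with a default never raises and its result is discarded, so it is Dict.erase.
def compare_photosets_alt (ps1 : List (String × String)) (ps2 : List (String × String)) : (List (String × String)) × (List (String × String)) :=
  let missing_in_ps1 := ps1.foldl
    (fun (m : PySem.Dict String String) photo => m.erase photo.1)
    (PySem.Dict.mk ps2)
  let missing_in_ps2 := ps2.foldl
    (fun (m : PySem.Dict String String) photo => m.erase photo.1)
    (PySem.Dict.mk ps1)
  (missing_in_ps1.items, missing_in_ps2.items)

-- ===== PRECONDITION & SPEC =====
-- Pre_ excludes association lists with duplicate keys: they encode no Python dict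
-- (both parameters of A are dicts), so no Python-level input is excluded.
def Pre_compare_photosets (ps1 : List (String × String)) (ps2 : List (String × String)) : Prop :=
  (ps1.map (·.1)).Nodup ∧ (ps2.map (·.1)).Nodup
instance (ps1 : List (String × String)) (ps2 : List (String × String)) : Decidable (Pre_compare_photosets ps1 ps2) := by unfold Pre_compare_photosets; infer_instance

def pvWitness_compare_photosets : (List (String × String)) × (List (String × String)) :=
  ([("a", "1"), ("b", "2")], [("b", "3"), ("c", "4")])

def Spec_compare_photosets (ps1 : List (String × String)) (ps2 : List (String × String)) (out : (List (String × String)) × (List (String × String))) : Prop := out = compare_photosets_alt ps1 ps2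
instance (ps1 : List (String × String)) (ps2 : List (String × String)) (out : (List (String × String)) × (List (String × String))) : Decidable (Spec_compare_photosets ps1 ps2 out) := by unfold Spec_compare_photosets; infer_instance

-- ===== CLAIM (what is proved, stated in full; the proofs are below) =====
def Claim_equal_compare_photosets : Prop := ∀ (ps1 : List (String × String)) (ps2 : List (String × String)), Dom_compare_photosets ps1 ps2 → Pre_compare_photosets ps1 ps2 → Spec_compare_photosets ps1 ps2 (compare_photosets ps1 ps2)

-- ===== LEMMAS AND PROOFS =====

-- A's filter-insert loop over a nodup-key list l, starting from an accumulator m fresh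
-- for all of l's keys, appends exactly the entries of l whose key fails d1.contains,
-- provided the inserted lookup value agrees with the entry's own value.
theorem pv_insert_loop (d1 d2 : PySem.Dict String String)
    (l : List (String × String)) (m : PySem.Dict String String)
    (hv : ∀ p ∈ l, d2.getD p.1 "" = p.2)
    (hfresh : ∀ p ∈ l, m.contains p.1 = false)
    (hnd : (l.map (·.1)).Nodup) :
    (l.foldl (fun m photo =>
        if !(d1.contains photo.1) then m.insert photo.1 (d2.getD photo.1 "") else m) m).items
    = m.items ++ l.filter (fun q => !(d1.contains q.1)) := by
  induction l generalizing m with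
  | nil => simp
  | cons p t ih =>
    simp only [List.map_cons, List.nodup_cons, List.mem_map] at hnd
    have hvp : d2.getD p.1 "" = p.2 := hv p (List.mem_cons_self ..)
    have hvt : ∀ q ∈ t, d2.getD q.1 "" = q.2 := fun q hq => hv q (List.mem_cons_of_mem _ hq)
    simp only [List.foldl_cons, List.filter_cons]
    by_cases h1 : d1.contains p.1 = true
    · rw [if_neg (by simp [h1])]
      rw [ih m hvt (fun q hq => hfresh q (List.mem_cons_of_mem _ hq)) hnd.2]
      simp [h1]
    · simp only [Bool.not_eq_true] at h1
      rw [if_pos (by simp [h1]), hvp]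
      rw [ih (m.insert p.1 p.2) hvt
        (fun q hq => by
          have hne : ¬ (q.1 = p.1) := fun he => hnd.1 ⟨q, hq, he⟩
          rw [PySem.Dict.contains_insert]
          simp [hne, hfresh q (List.mem_cons_of_mem _ hq)])
        hnd.2]
      rw [PySem.Dict.items_insert_of_not_contains m p.2 (hfresh p (List.mem_cons_self ..))]
      simp [h1]

-- B's delete loop: erasing all of l's keys from d filters d's items down to those
-- whose key occurs nowhere in l.
theorem pv_erase_loop (l : List (String × String)) (d : PySem.Dict String String) :
    (l.foldl (fun m photo => m.erase photo.1) d).items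
    = d.items.filter (fun q => !(l.any (fun p => p.1 == q.1))) := by
  induction l generalizing d with
  | nil => simp
  | cons p t ih =>
    simp only [List.foldl_cons, ih]
    show ((d.erase p.1).items).filter _ = _
    simp only [PySem.Dict.erase, List.filter_filter]
    apply List.filter_congr
    intro q _
    simp only [List.any_cons, Bool.not_or, Bool.and_comm]
    have : (q.1 == p.1) = (p.1 == q.1) := by
      by_cases h : q.1 = p.1 <;> simp [h, Ne.symm, eq_comm]
    rw [this]

-- entries of a nodup-key list look themselves up
theorem pv_getD_self (l : List (String × String)) (hnd : (l.map (·.1)).Nodup)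
    (p : String × String) (hp : p ∈ l) : (PySem.Dict.mk l).getD p.1 "" = p.2 := by
  apply PySem.Dict.getD_of_mem_items (d := PySem.Dict.mk l) hp
  simpa [PySem.Dict.keys] using hnd

-- the two filter predicates agree: Dict.contains on Dict.mk l is an any-scan of l's keys
theorem pv_filter_pred (l l' : List (String × String)) :
    l.filter (fun q => !((PySem.Dict.mk l').contains q.1))
    = l.filter (fun q => !(l'.any (fun p => p.1 == q.1))) := by
  apply List.filter_congr
  intro q _
  rw [PySem.Dict.contains_mk]

-- ===== VERDICT (by name: the statement is the Claim_ definition above) =====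
theorem compare_photosets_spec : Claim_equal_compare_photosets := by
  intro ps1 ps2 _ hpre
  show compare_photosets ps1 ps2 = compare_photosets_alt ps1 ps2
  simp only [compare_photosets, compare_photosets_alt]
  rw [pv_insert_loop (PySem.Dict.mk ps1) (PySem.Dict.mk ps2) ps2 PySem.Dict.empty
        (pv_getD_self ps2 hpre.2) (fun p _ => PySem.Dict.contains_empty p.1) hpre.2,
      pv_insert_loop (PySem.Dict.mk ps2) (PySem.Dict.mk ps1) ps1 PySem.Dict.empty
        (pv_getD_self ps1 hpre.1) (fun p _ => PySem.Dict.contains_empty p.1) hpre.1,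
      pv_erase_loop ps1 (PySem.Dict.mk ps2), pv_erase_loop ps2 (PySem.Dict.mk ps1),
      pv_filter_pred ps2 ps1, pv_filter_pred ps1 ps2]
  rfl
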